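-- pv_equiv track=rewrite | github.com/Vaisssh-navi/plivo | src/rules.py | collapse_spelled_letters
-- ===== SOURCE A (Python) =====
-- def collapse_spelled_letters(s: str) -> str:
--     """Collapse sequences like 'g m a i l' -> 'gmail'."""
--     tokens, out, i = s.split(), [], 0
--     while i < len(tokens):
--         j = i
--         while j < len(tokens) and len(tokens[j]) == 1 and tokens[j].isalpha():
--             j += 1
--         if j - i >= 3:
--             out.append("".join(tokens[i:j]))
--             i = j
--         else:
--             out.append(tokens[i])
--             i += 1
--     return " ".join(out)
-- ===== SOURCE B (Python) =====
-- def collapse_spelled_letters(s: str) -> str: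
--     """Collapse sequences like 'g m a i l' -> 'gmail'.
--
--     Single pass with a pending-run accumulator instead of A's
--     index-advancing nested-while rescan.
--     """
--     out, run = [], []
--
--     def flush():
--         if len(run) >= 3:
--             out.append("".join(run))
--         else:
--             out.extend(run)
--         run.clear()
--
--     for t in s.split():
--         if len(t) == 1 and t.isalpha():
--             run.append(t)
--         else:
--             flush()
--             out.append(t)
--     flush()
--     return " ".join(out)
-- ===== Notes on version B (the rewrite author's own statement) =====
-- stated objective: alternative
-- what changed: Replaced A's index-advancing outer/inner while rescan with a single left-to-right pass that accumulates the pending run of single-letter tokens and flushes it (joined if length >= 3) at each non-letter token and at the end.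
import Mathlib
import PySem

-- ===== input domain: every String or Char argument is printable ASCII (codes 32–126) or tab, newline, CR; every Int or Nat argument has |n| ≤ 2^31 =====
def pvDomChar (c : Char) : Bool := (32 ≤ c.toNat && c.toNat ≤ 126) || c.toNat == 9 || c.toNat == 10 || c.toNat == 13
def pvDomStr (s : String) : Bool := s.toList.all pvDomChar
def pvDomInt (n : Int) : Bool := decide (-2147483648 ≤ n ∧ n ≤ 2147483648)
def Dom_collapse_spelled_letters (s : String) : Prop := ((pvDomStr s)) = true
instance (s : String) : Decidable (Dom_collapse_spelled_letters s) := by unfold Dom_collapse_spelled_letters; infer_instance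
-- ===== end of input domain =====

-- B replaces A's index-advancing nested-while rescan by a single pass with a
-- pending-run accumulator (alternative decomposition, same cost).

-- ===== PORT A =====
-- 'len(tokens[j]) == 1 and tokens[j].isalpha()'
def pvPred (t : String) : Bool := (PySem.Str.len t == 1) && PySem.Str.strIsalpha t

-- inner while: advance j while the current token is a single letter
def pvScanA (tokens : List String) (j : Nat) : Nat :=
  if j < tokens.length && pvPred (PySem.List.pyGetD tokens (j : Int) "") then
    pvScanA tokens (j + 1)
  else j
termination_by tokens.length - j
decreasing_by
  rename_i h
  simp at h
  omega

-- outer while over i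
def pvLoopA (tokens : List String) (out : List String) (i : Nat) : List String :=
  if i < tokens.length then
    let j := pvScanA tokens i
    if 3 ≤ j - i then
      pvLoopA tokens (out ++ [PySem.Str.join "" (PySem.List.slice tokens (some (i : Int)) (some (j : Int)))]) j
    else
      pvLoopA tokens (out ++ [PySem.List.pyGetD tokens (i : Int) ""]) (i + 1)
  else out
termination_by tokens.length - i
decreasing_by
  · omega
  · omega

def collapse_spelled_letters (s : String) : String :=
  PySem.Str.join " " (pvLoopA (PySem.Str.split₀ s) [] 0)

-- ===== PORT B =====
-- flush(): emit the pending run, joined if it has >= 3 tokens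
def pvEmit (out run : List String) : List String :=
  if 3 ≤ run.length then out ++ [PySem.Str.join "" run] else out ++ run

-- the body of B's for-loop, state = (out, run)
def pvStepB (st : List String × List String) (t : String) : List String × List String :=
  if (PySem.Str.len t == 1) && PySem.Str.strIsalpha t then (st.1, st.2 ++ [t])
  else (pvEmit st.1 st.2 ++ [t], [])


def collapse_spelled_letters_alt (s : String) : String :=
  let st := (PySem.Str.split₀ s).foldl pvStepB ([], [])
  PySem.Str.join " " (pvEmit st.1 st.2)

-- ===== PRECONDITION & SPEC =====
def Spec_collapse_spelled_letters (s : String) (out : String) : Prop := out = collapse_spelled_letters_alt s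
instance (s : String) (out : String) : Decidable (Spec_collapse_spelled_letters s out) := by unfold Spec_collapse_spelled_letters; infer_instance

-- ===== CLAIM (what is proved, stated in full; the proofs are below) =====
def Claim_equal_collapse_spelled_letters : Prop := ∀ (s : String), Dom_collapse_spelled_letters s → Spec_collapse_spelled_letters s (collapse_spelled_letters s)

-- ===== LEMMAS AND PROOFS =====
-- the test in pvStepB IS pvPred (both Pythons write it inline)
theorem pvStepB_eq (st : List String × List String) (t : String) :
    pvStepB st t = if pvPred t then (st.1, st.2 ++ [t]) else (pvEmit st.1 st.2 ++ [t], []) := rfl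

theorem pvEmit_nil (out : List String) : pvEmit out [] = out := by
  simp [pvEmit]

-- folding B's step over tokens that all satisfy pvPred just extends the run
theorem pvFoldB_pred (a : List String) (out run : List String)
    (ha : ∀ t ∈ a, pvPred t = true) :
    a.foldl pvStepB (out, run) = (out, run ++ a) := by
  induction a generalizing run with
  | nil => simp
  | cons x xs ih =>
      have hx : pvPred x = true := ha x (by simp)
      simp only [List.foldl_cons, pvStepB_eq, hx, if_pos]
      rw [ih (run ++ [x]) (fun t ht => ha t (by simp [ht]))]
      simp

-- flushing a short pending run token-by-token early makes no difference
theorem pvShift (a rest : List String) (run out : List String)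
    (ha : ∀ t ∈ a, pvPred t = true)
    (hrest : rest = [] ∨ ∃ t ts, rest = t :: ts ∧ pvPred t = false)
    (hlen : run.length + a.length < 3) :
    (let st := (a ++ rest).foldl pvStepB (out, run); pvEmit st.1 st.2)
      = (let st := (a ++ rest).foldl pvStepB (out ++ run, []); pvEmit st.1 st.2) := by
  have h1 : (a ++ rest).foldl pvStepB (out, run) = rest.foldl pvStepB (out, run ++ a) := by
    rw [List.foldl_append, pvFoldB_pred a out run ha]
  have h2 : (a ++ rest).foldl pvStepB (out ++ run, []) = rest.foldl pvStepB (out ++ run, a) := by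
    rw [List.foldl_append, pvFoldB_pred a (out ++ run) [] ha]
    simp
  have hemit : pvEmit out (run ++ a) = pvEmit (out ++ run) a := by
    simp only [pvEmit]
    rw [if_neg (by simp; omega), if_neg (by omega)]
    simp
  rcases hrest with h | ⟨t, ts, rfl, hpt⟩
  · subst h; simp only [h1, h2, List.foldl_nil]; exact hemit
  · simp only [h1, h2, List.foldl_cons, pvStepB_eq, hpt, Bool.false_eq_true, if_false, hemit]

-- the inner while returns i + (length of the maximal pvPred-run starting at i)
theorem pvScanA_char (tokens : List String) (i : Nat) :
    pvScanA tokens i = i + ((tokens.drop i).takeWhile pvPred).length := by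
  by_cases h : i < tokens.length
  · have hdrop : tokens.drop i = tokens[i] :: tokens.drop (i + 1) :=
      List.drop_eq_getElem_cons h
    have hget : PySem.List.pyGetD tokens (i : Int) "" = tokens[i] := by
      simp [List.getD_eq_getElem?_getD, List.getElem?_eq_getElem h]
    rw [pvScanA]
    by_cases hp : pvPred tokens[i] = true
    · rw [if_pos (by simp [h, hget, hp])]
      rw [pvScanA_char tokens (i + 1), hdrop, List.takeWhile_cons, if_pos hp]
      simp [List.length_cons]
      omega
    · rw [if_neg (by simp [hget, hp]), hdrop, List.takeWhile_cons, if_neg hp]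
      simp
  · rw [pvScanA, if_neg (by simp; omega), List.drop_eq_nil_of_le (by omega)]
    simp
termination_by tokens.length - i
decreasing_by omega

-- main invariant: A's outer loop from index i equals B's fold over the suffix
theorem pvLoop_eq_fold (tokens : List String) (i : Nat) (out : List String) :
    pvLoopA tokens out i
      = (let st := (tokens.drop i).foldl pvStepB (out, []); pvEmit st.1 st.2) := by
  by_cases h : i < tokens.length
  · have hdrop : tokens.drop i = tokens[i] :: tokens.drop (i + 1) :=
      List.drop_eq_getElem_cons h
    have hget : PySem.List.pyGetD tokens (i : Int) "" = tokens[i] := by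
      simp [List.getD_eq_getElem?_getD, List.getElem?_eq_getElem h]
    have hscan := pvScanA_char tokens i
    set a := (tokens.drop i).takeWhile pvPred with ha_def
    have ha : ∀ t ∈ a, pvPred t = true := fun t ht => List.mem_takeWhile_imp ht
    have hsplit : tokens.drop i = a ++ (tokens.drop i).dropWhile pvPred :=
      (List.takeWhile_append_dropWhile).symm
    have hrest : (tokens.drop i).dropWhile pvPred = []
        ∨ ∃ t ts, (tokens.drop i).dropWhile pvPred = t :: ts ∧ pvPred t = false := by
      cases hr : (tokens.drop i).dropWhile pvPred with
      | nil => left; rfl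
      | cons t ts =>
          right; exact ⟨t, ts, rfl, by
            have := List.head?_dropWhile_not pvPred (tokens.drop i)
            rw [hr] at this; simpa using this⟩
    by_cases hp : pvPred tokens[i] = true
    · -- inside a run
      have halen : 1 ≤ a.length := by
        rw [ha_def, hdrop, List.takeWhile_cons, if_pos hp]; simp
      by_cases h3 : 3 ≤ a.length
      · -- long run: A joins and jumps to j
        rw [pvLoopA, if_pos h, if_pos (by rw [hscan]; omega)]
        have hj : pvScanA tokens i = i + a.length := hscan
        have hja : tokens.drop (pvScanA tokens i) = (tokens.drop i).dropWhile pvPred := by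
          rw [hj, ← List.drop_drop]
          conv_lhs => rw [hsplit]
          rw [show a.length = a.length from rfl]
          simpa using List.drop_left a _
        have hslice : PySem.List.slice tokens (some (i : Int)) (some ((pvScanA tokens i : Nat) : Int)) = a := by
          rw [PySem.List.slice_natCast, hj]
          have : i + a.length - i = a.length := by omega
          rw [this]
          conv_lhs => rw [hsplit]
          simpa using List.take_left a _
        rw [pvLoop_eq_fold tokens (pvScanA tokens i) _]
        rw [hja]
        conv_rhs => rw [hsplit, List.foldl_append, pvFoldB_pred a out [] ha]
        rcases hrest with hr | ⟨t, ts, hr, hpt⟩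
        · rw [hr]
          simp only [List.foldl_nil]
          rw [hslice]
          simp [pvEmit, h3, pvEmit_nil]
        · rw [hr]
          simp only [List.foldl_cons, pvStepB_eq, hpt, Bool.false_eq_true, if_false, List.nil_append]
          rw [hslice]
          simp only [pvEmit, if_pos h3, if_neg (by simp : ¬ 3 ≤ ([] : List String).length)]
          simp
      · -- short run: A emits the head token alone
        rw [pvLoopA, if_pos h, if_neg (by rw [hscan]; omega)]
        rw [pvLoop_eq_fold tokens (i + 1) _]
        rw [hget]
        -- RHS: fold over drop i = tokens[i] :: drop (i+1), first step extends run
        conv_rhs => rw [hdrop]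
        simp only [List.foldl_cons, pvStepB_eq, hp, if_pos, List.nil_append]
        -- now compare fold from (out ++ [tokens[i]], []) with fold from (out, [tokens[i]])
        have ha' : ∀ t ∈ (tokens.drop (i+1)).takeWhile pvPred, pvPred t = true :=
          fun t ht => List.mem_takeWhile_imp ht
        have hsplit' : tokens.drop (i+1)
            = (tokens.drop (i+1)).takeWhile pvPred ++ (tokens.drop (i+1)).dropWhile pvPred :=
          (List.takeWhile_append_dropWhile).symm
        have hrest' : (tokens.drop (i+1)).dropWhile pvPred = []
            ∨ ∃ t ts, (tokens.drop (i+1)).dropWhile pvPred = t :: ts ∧ pvPred t = false := by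
          cases hr : (tokens.drop (i+1)).dropWhile pvPred with
          | nil => left; rfl
          | cons t ts =>
              right; exact ⟨t, ts, rfl, by
                have := List.head?_dropWhile_not pvPred (tokens.drop (i+1))
                rw [hr] at this; simpa using this⟩
        have hlen' : ([tokens[i]] : List String).length
            + ((tokens.drop (i+1)).takeWhile pvPred).length < 3 := by
          have : a.length = 1 + ((tokens.drop (i+1)).takeWhile pvPred).length := by
            rw [ha_def, hdrop, List.takeWhile_cons, if_pos hp]; simp; omega
          simp; omega
        have := pvShift ((tokens.drop (i+1)).takeWhile pvPred)
          ((tokens.drop (i+1)).dropWhile pvPred) [tokens[i]] out ha' hrest' hlen'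
        rw [← hsplit'] at this
        rw [this]
    · -- not a single letter: emit it and continue
      rw [pvLoopA, if_pos h, if_neg (by rw [hscan, ha_def, hdrop, List.takeWhile_cons, if_neg hp]; simp)]
      rw [pvLoop_eq_fold tokens (i + 1) _, hget]
      conv_rhs => rw [hdrop]
      simp only [List.foldl_cons, pvStepB_eq, hp, Bool.false_eq_true, if_false]
      rw [pvEmit_nil]
  · rw [pvLoopA, if_neg (by omega), List.drop_eq_nil_of_le (by omega)]
    simp [pvEmit_nil]
termination_by tokens.length - i
decreasing_by
  · have := pvScanA_char tokens i; omega
  · omega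
  · omega

-- ===== VERDICT (by name: the statement is the Claim_ definition above) =====
theorem collapse_spelled_letters_spec : Claim_equal_collapse_spelled_letters := by
  intro s _
  unfold Spec_collapse_spelled_letters collapse_spelled_letters collapse_spelled_letters_alt
  rw [pvLoop_eq_fold (PySem.Str.split₀ s) 0 []]
  simp
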